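-- pv_equiv track=rewrite | github.com/RahulKathuria/HackerRank-Algorithms | Algorithms/Birthday Cake Candles/Birthday Cake Candles.py | birthdayCakeCandles
-- ===== SOURCE A (Python) =====
-- def birthdayCakeCandles(n, ar):
--     i=1
--     largest = ar[0]
--     while i<n:
--         if ar[i]>largest:
--             largest = ar[i]
--         i = i+1
--     count = 0
--     i = 0
--     while i<n:
--         if ar[i]==largest:
--             count = count+1
--         i = i+1
--     return count
-- ===== SOURCE B (Python) =====
-- def birthdayCakeCandles(n, ar):
--     largest = ar[0]
--     count = 0
--     for i in range(n):
--         v = ar[i]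
--         if v > largest:
--             largest = v
--             count = 1
--         elif v == largest:
--             count += 1
--     return count
-- ===== Notes on version B (the rewrite author's own statement) =====
-- stated objective: alternative
-- what changed: B computes the maximum and its occurrence count in one pass over range(n), maintaining a (largest, count) pair and resetting the count when a new maximum appears, instead of A's two sequential while-loops (one to find the max, one to count it).
import Mathlib
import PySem

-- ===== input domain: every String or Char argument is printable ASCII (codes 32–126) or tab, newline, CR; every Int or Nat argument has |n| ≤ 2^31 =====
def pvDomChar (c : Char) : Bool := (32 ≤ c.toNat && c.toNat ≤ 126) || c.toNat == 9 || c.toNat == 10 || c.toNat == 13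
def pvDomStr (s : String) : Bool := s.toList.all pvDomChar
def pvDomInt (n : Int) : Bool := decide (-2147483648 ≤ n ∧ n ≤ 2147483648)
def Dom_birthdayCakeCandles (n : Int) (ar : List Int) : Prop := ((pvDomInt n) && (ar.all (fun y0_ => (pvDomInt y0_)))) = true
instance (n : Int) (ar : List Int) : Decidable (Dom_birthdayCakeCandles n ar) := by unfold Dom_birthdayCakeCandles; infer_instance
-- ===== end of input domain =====

-- B folds once over range(n) carrying a (largest, count) pair instead of A's two sequential scans; objective: alternative (same O(n) cost).

-- ===== PORT A =====
-- first while-loop of A: scan indices i..n-1 updating the running largest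
def pvALoop1 (ar : List Int) (n i largest : Int) : Int :=
  if _h : i < n then
    pvALoop1 ar n (i + 1)
      (if (PySem.List.pyGet? ar i).getD 0 > largest then (PySem.List.pyGet? ar i).getD 0 else largest)
  else largest
termination_by (n - i).toNat
decreasing_by omega

-- second while-loop of A: scan indices i..n-1 counting elements equal to largest
def pvALoop2 (ar : List Int) (n i largest count : Int) : Int :=
  if _h : i < n then
    pvALoop2 ar n (i + 1) largest
      (if (PySem.List.pyGet? ar i).getD 0 == largest then count + 1 else count)
  else count
termination_by (n - i).toNat
decreasing_by omega

def birthdayCakeCandles (n : Int) (ar : List Int) : Int :=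
  let largest := (PySem.List.pyGet? ar 0).getD 0   -- ar[0]; IndexError excluded by Pre_
  pvALoop2 ar n 0 (pvALoop1 ar n 1 largest) 0

-- ===== PORT B =====
-- B's loop body: update the (largest, count) pair with element ar[i]
def pvBStep (ar : List Int) (s : Int × Int) (i : Int) : Int × Int :=
  let v := (PySem.List.pyGet? ar i).getD 0   -- ar[i]; IndexError excluded by Pre_
  if v > s.1 then (v, 1) else if v == s.1 then (s.1, s.2 + 1) else s

def birthdayCakeCandles_alt (n : Int) (ar : List Int) : Int :=
  ((PySem.List.pyRange 0 n 1).foldl (pvBStep ar)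
    ((PySem.List.pyGet? ar 0).getD 0, 0)).2

-- ===== PRECONDITION & SPEC =====
-- Pre_ excludes exactly the inputs where the Python A raises IndexError: ar empty (ar[0]) or n beyond len(ar).
def Pre_birthdayCakeCandles (n : Int) (ar : List Int) : Prop := ar ≠ [] ∧ n ≤ (ar.length : Int)
instance (n : Int) (ar : List Int) : Decidable (Pre_birthdayCakeCandles n ar) := by unfold Pre_birthdayCakeCandles; infer_instance
def pvWitness_birthdayCakeCandles : Int × List Int := (3, [1, 3, 3])

def Spec_birthdayCakeCandles (n : Int) (ar : List Int) (out : Int) : Prop := out = birthdayCakeCandles_alt n ar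
instance (n : Int) (ar : List Int) (out : Int) : Decidable (Spec_birthdayCakeCandles n ar out) := by unfold Spec_birthdayCakeCandles; infer_instance

-- ===== CLAIM (what is proved, stated in full; the proofs are below) =====
def Claim_equal_birthdayCakeCandles : Prop := ∀ (n : Int) (ar : List Int), Dom_birthdayCakeCandles n ar → Pre_birthdayCakeCandles n ar → Spec_birthdayCakeCandles n ar (birthdayCakeCandles n ar)

-- ===== LEMMAS AND PROOFS =====

-- element read at index j (shared shorthand for the proofs)
def pvG (ar : List Int) (j : Int) : Int := (PySem.List.pyGet? ar j).getD 0

theorem pvLe_foldl_max (l : List Int) (m : Int) : m ≤ l.foldl max m := by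
  induction l generalizing m with
  | nil => simp
  | cons a t ih => exact le_trans (le_max_left m a) (ih (max m a))

theorem pvIfMax (ar : List Int) (i m : Int) :
    (if (PySem.List.pyGet? ar i).getD 0 > m then (PySem.List.pyGet? ar i).getD 0 else m)
      = max m (pvG ar i) := by
  simp only [pvG, max_def]
  split <;> split <;> omega

theorem pvALoop1_eq (ar : List Int) (n i m : Int) :
    pvALoop1 ar n i m = ((PySem.List.pyRange i n 1).map (pvG ar)).foldl max m := by
  fun_induction pvALoop1 ar n i m with
  | case1 i m h ih =>
    simp only [dite_eq_ite] at ih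
    rw [ih, PySem.List.pyRange_one_cons h]
    simp only [List.map_cons, List.foldl_cons, pvIfMax]
  | case2 i m h =>
    rw [PySem.List.pyRange_one_eq_nil (by omega)]
    simp

theorem pvALoop2_eq (ar : List Int) (n i m c : Int) :
    pvALoop2 ar n i m c =
      c + (((PySem.List.pyRange i n 1).map (pvG ar)).countP (· == m) : Int) := by
  fun_induction pvALoop2 ar n i m c with
  | case1 i c h ih =>
    simp only [dite_eq_ite] at ih
    rw [ih, PySem.List.pyRange_one_cons h]
    simp only [List.map_cons, List.countP_cons, pvG]
    split <;> simp_all <;> push_cast <;> omega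
  | case2 i c h =>
    rw [PySem.List.pyRange_one_eq_nil (by omega)]
    simp

theorem pvBStep_eq (ar : List Int) (m c i : Int) :
    pvBStep ar (m, c) i =
      (max m (pvG ar i),
        if pvG ar i > m then 1 else if pvG ar i = m then c + 1 else c) := by
  simp only [pvBStep, pvG]
  by_cases h1 : m < (PySem.List.pyGet? ar i).getD 0
  · simp [h1, max_eq_right h1.le]
  · by_cases h2 : (PySem.List.pyGet? ar i).getD 0 = m
    · simp [h1, h2]
    · simp [h1, h2, max_eq_left (by omega : (PySem.List.pyGet? ar i).getD 0 ≤ m)]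

theorem pvBFold_eq (ar : List Int) (n i m c : Int) :
    ((PySem.List.pyRange i n 1).foldl (pvBStep ar) (m, c)).2 =
      (if ((PySem.List.pyRange i n 1).map (pvG ar)).foldl max m = m then c else 0)
        + (((PySem.List.pyRange i n 1).map (pvG ar)).countP
            (· == ((PySem.List.pyRange i n 1).map (pvG ar)).foldl max m) : Int) := by
  by_cases h : i < n
  · have hfuel : (n - (i + 1)).toNat < (n - i).toNat := by omega
    rw [PySem.List.pyRange_one_cons h]
    simp only [List.map_cons, List.foldl_cons, List.countP_cons, pvBStep_eq]
    by_cases h1 : pvG ar i > m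
    · simp only [if_pos h1, max_eq_right h1.le]
      rw [pvBFold_eq ar n (i + 1) (pvG ar i) 1]
      have hge : pvG ar i ≤ ((PySem.List.pyRange (i+1) n 1).map (pvG ar)).foldl max (pvG ar i) :=
        pvLe_foldl_max _ _
      have hne : ¬ (((PySem.List.pyRange (i+1) n 1).map (pvG ar)).foldl max (pvG ar i) = m) := by omega
      rw [if_neg hne]
      by_cases h2 : ((PySem.List.pyRange (i+1) n 1).map (pvG ar)).foldl max (pvG ar i) = pvG ar i
      · simp [h2]; push_cast; omega
      · have : (pvG ar i == ((PySem.List.pyRange (i+1) n 1).map (pvG ar)).foldl max (pvG ar i)) = false := by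
          simp [beq_iff_eq]; omega
        simp [h2, this]
    · simp only [if_neg h1, max_eq_left (by omega : pvG ar i ≤ m)]
      by_cases h2 : pvG ar i = m
      · rw [if_pos h2, pvBFold_eq ar n (i + 1) m (c + 1)]
        by_cases h3 : ((PySem.List.pyRange (i+1) n 1).map (pvG ar)).foldl max m = m
        · simp [h3, h2]; push_cast; omega
        · have : (pvG ar i == ((PySem.List.pyRange (i+1) n 1).map (pvG ar)).foldl max m) = false := by
            simp [beq_iff_eq]; omega
          simp [h3, this]
      · rw [if_neg h2, pvBFold_eq ar n (i + 1) m c]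
        have hge : m ≤ ((PySem.List.pyRange (i+1) n 1).map (pvG ar)).foldl max m :=
          pvLe_foldl_max _ _
        have : (pvG ar i == ((PySem.List.pyRange (i+1) n 1).map (pvG ar)).foldl max m) = false := by
          simp [beq_iff_eq]; omega
        simp [this]
  · rw [PySem.List.pyRange_one_eq_nil (by omega)]
    simp
termination_by (n - i).toNat

-- the two starting points compute the same maximum
theorem pvMax_agree (ar : List Int) (n : Int) :
    ((PySem.List.pyRange 0 n 1).map (pvG ar)).foldl max ((PySem.List.pyGet? ar 0).getD 0) =
      ((PySem.List.pyRange 1 n 1).map (pvG ar)).foldl max ((PySem.List.pyGet? ar 0).getD 0) := by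
  by_cases h : (0 : Int) < n
  · rw [PySem.List.pyRange_one_cons h]
    show List.foldl max (max ((PySem.List.pyGet? ar 0).getD 0) (pvG ar 0)) _ = _
    rw [show pvG ar 0 = (PySem.List.pyGet? ar 0).getD 0 from rfl, max_self]
    norm_num
  · rw [PySem.List.pyRange_one_eq_nil (by omega : n ≤ 0),
        PySem.List.pyRange_one_eq_nil (by omega : n ≤ 1)]

-- ===== VERDICT (by name: the statement is the Claim_ definition above) =====
theorem birthdayCakeCandles_spec : Claim_equal_birthdayCakeCandles := by
  intro n ar _ _
  unfold Spec_birthdayCakeCandles birthdayCakeCandles birthdayCakeCandles_alt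
  rw [pvALoop2_eq, pvALoop1_eq, pvBFold_eq]
  simp only [pvMax_agree]
  split <;> simp
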